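-- pv_equiv track=rewrite | github.com/nhtlongcs/AIC2021-TheFirstSwans | postprocess/clean.py | is_phone_number_with_space
-- ===== SOURCE A (Python) =====
-- def is_phone_number_with_space(tokens):
--     PHONE_SEP = ".-()/ "
--     for token in tokens:
--         for sep in PHONE_SEP:
--             token = token.replace(sep, "")
--         if not token.isnumeric():
--             return False
--     return True
-- ===== SOURCE B (Python) =====
-- def is_phone_number_with_space(tokens):
--     PHONE_SEP = ".-()/ "
--     for token in tokens:
--         has_digit = False
--         ok = True
--         for ch in token:
--             if ch in PHONE_SEP:
--                 continue
--             if ch.isnumeric():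
--                 has_digit = True
--             else:
--                 ok = False
--                 break
--         if not (ok and has_digit):
--             return False
--     return True
-- ===== Notes on version B (the rewrite author's own statement) =====
-- stated objective: alternative
-- what changed: Replaces the six whole-string .replace passes plus a final .isnumeric per token with a single character-classification pass per token (skip separators, flag a digit, bail on the first other character); trades allocation-free single traversal for CPython's C-level replace loops, same asymptotic cost.
import Mathlib
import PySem

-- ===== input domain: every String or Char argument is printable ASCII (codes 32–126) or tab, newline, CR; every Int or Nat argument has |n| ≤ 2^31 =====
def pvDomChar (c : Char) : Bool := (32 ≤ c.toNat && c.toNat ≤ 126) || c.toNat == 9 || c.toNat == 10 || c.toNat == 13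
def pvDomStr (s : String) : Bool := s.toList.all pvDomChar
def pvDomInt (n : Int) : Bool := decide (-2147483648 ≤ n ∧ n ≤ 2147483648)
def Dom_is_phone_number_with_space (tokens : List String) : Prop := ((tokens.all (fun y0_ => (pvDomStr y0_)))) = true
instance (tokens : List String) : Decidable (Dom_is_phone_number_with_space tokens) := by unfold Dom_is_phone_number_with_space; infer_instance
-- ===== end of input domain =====

-- B replaces A's six whole-string .replace passes plus a final .isnumeric with one
-- character-classification pass per token; same return value on the ASCII domain
-- (str.isnumeric is ported as the ASCII digit test, exact on Dom).

-- ===== PORT A =====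
-- port of: for sep in ".-()/ ": token = token.replace(sep, "")  followed by token.isnumeric()
def is_phone_number_with_space : List String → Bool
  | [] => true
  | token :: rest =>
    let token := ".-()/ ".toList.foldl (fun t sep => PySem.Str.replace t (String.singleton sep) "") token
    if !(PySem.Str.strIsdigit token) then false  -- .isnumeric(), exact on the ASCII domain
    else is_phone_number_with_space rest

-- ===== PORT B =====
-- one pass over the token's characters: (has_digit, loop with break) as in Source B
def pbToken : List Char → Bool → Bool
  | [], hasDigit => hasDigit
  | c :: rest, hasDigit =>
    if ".-()/ ".toList.contains c then pbToken rest hasDigit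
    else if PySem.Chars.isdigit c then pbToken rest true  -- ch.isnumeric(), exact on the ASCII domain
    else false

def is_phone_number_with_space_alt : List String → Bool
  | [] => true
  | token :: rest =>
    if pbToken token.toList false then is_phone_number_with_space_alt rest else false

-- ===== PRECONDITION & SPEC =====
def Spec_is_phone_number_with_space (tokens : List String) (out : Bool) : Prop := out = is_phone_number_with_space_alt tokens
instance (tokens : List String) (out : Bool) : Decidable (Spec_is_phone_number_with_space tokens out) := by unfold Spec_is_phone_number_with_space; infer_instance

-- ===== CLAIM (what is proved, stated in full; the proofs are below) =====
def Claim_equal_is_phone_number_with_space : Prop := ∀ (tokens : List String), Dom_is_phone_number_with_space tokens → Spec_is_phone_number_with_space tokens (is_phone_number_with_space tokens)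

-- ===== LEMMAS AND PROOFS =====

-- replace.go with a single-character pattern and empty replacement is a filter
theorem replace_go_single (a : Char) (fuel : Nat) :
    ∀ (l acc : List Char), l.length ≤ fuel →
      PySem.Chars.replace.go [a] [] fuel l acc = acc.reverse ++ l.filter (fun c => c ≠ a) := by
  induction fuel with
  | zero =>
    intro l acc h
    have : l = [] := List.eq_nil_of_length_eq_zero (Nat.le_zero.mp h)
    subst this
    simp [PySem.Chars.replace.go]
  | succ n ih =>
    intro l acc h
    cases l with
    | nil => simp [PySem.Chars.replace.go]
    | cons c t =>
      simp only [PySem.Chars.replace.go]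
      by_cases hc : c = a
      · subst hc
        have hpre : List.isPrefixOf [c] (c :: t) = true := by simp [List.isPrefixOf]
        rw [if_pos hpre]
        simp only [List.length, List.drop_succ_cons, List.drop_zero, List.reverse_nil,
          List.nil_append]
        rw [ih t acc (by simpa using Nat.le_of_succ_le_succ h)]
        simp
      · have hpre : List.isPrefixOf [a] (c :: t) = false := by
          simp [List.isPrefixOf, BEq.beq]
          exact fun h' => hc h'.symm
        rw [if_neg (by simp [hpre])]
        rw [ih t (c :: acc) (by simpa using Nat.le_of_succ_le_succ h)]
        simp [hc]

theorem replace_single (a : Char) (cs : List Char) :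
    PySem.Chars.replace cs [a] [] = cs.filter (fun c => c ≠ a) := by
  simp only [PySem.Chars.replace, List.isEmpty_cons]
  exact replace_go_single a cs.length cs [] le_rfl

-- a separator-list-generic copy of pbToken, for lemmas that must not unfold the literal list
def pbTokenG (L : List Char) : List Char → Bool → Bool
  | [], hasDigit => hasDigit
  | c :: rest, hasDigit =>
    if L.contains c then pbTokenG L rest hasDigit
    else if PySem.Chars.isdigit c then pbTokenG L rest true
    else false

theorem pbToken_eq_gen (cs : List Char) : ∀ hd : Bool,
    pbToken cs hd = pbTokenG ".-()/ ".toList cs hd := by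
  induction cs with
  | nil => intro hd; rfl
  | cons c t ih =>
    intro hd
    simp only [pbToken, pbTokenG, ih]

theorem pbTokenG_char (L : List Char) (cs : List Char) : ∀ hd : Bool,
    pbTokenG L cs hd =
      ((hd || !(cs.filter (fun c => !L.contains c)).isEmpty)
        && (cs.filter (fun c => !L.contains c)).all PySem.Chars.isdigit) := by
  induction cs with
  | nil => intro hd; simp [pbTokenG]
  | cons c t ih =>
    intro hd
    by_cases hs : c ∈ L
    · simp [pbTokenG, hs, ih]
    · by_cases hdg : PySem.Chars.isdigit c = true
      · simp [pbTokenG, hs, hdg, ih]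
      · simp [pbTokenG, hs, hdg]

-- the six chained single-character replaces equal one filter over the separator set
theorem strip_eq_filter (cs : List Char) :
    ".-()/ ".toList.foldl (fun t sep => PySem.Chars.replace t [sep] []) cs
      = cs.filter (fun c => !".-()/ ".toList.contains c) := by
  show List.foldl _ _ ['.', '-', '(', ')', '/', ' '] = _
  simp only [List.foldl, replace_single, List.filter_filter]
  apply List.filter_congr
  intro c _
  rw [Bool.eq_iff_iff]
  simp
  tauto

-- per-token agreement
theorem token_eq (token : String) :
    PySem.Str.strIsdigit
        (".-()/ ".toList.foldl (fun t sep => PySem.Str.replace t (String.singleton sep) "") token)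
      = pbToken token.toList false := by
  have hfold : ∀ (seps : List Char) (t : String),
      (seps.foldl (fun t sep => PySem.Str.replace t (String.singleton sep) "") t).toList
        = seps.foldl (fun t sep => PySem.Chars.replace t [sep] []) t.toList := by
    intro seps
    induction seps with
    | nil => intro t; rfl
    | cons s ss ih =>
      intro t
      simp only [List.foldl]
      rw [ih]
      congr 1
      simp [PySem.Str.replace, String.singleton]
  rw [pbToken_eq_gen, pbTokenG_char, ← strip_eq_filter]
  simp only [PySem.Str.strIsdigit, hfold]
  simp [PySem.Chars.strIsdigit, Bool.false_or]

-- ===== VERDICT (by name: the statement is the Claim_ definition above) =====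
theorem is_phone_number_with_space_spec : Claim_equal_is_phone_number_with_space := by
  unfold Claim_equal_is_phone_number_with_space Spec_is_phone_number_with_space
  intro tokens _
  clear ‹Dom_is_phone_number_with_space tokens›
  induction tokens with
  | nil => rfl
  | cons token rest ih =>
    simp only [is_phone_number_with_space, is_phone_number_with_space_alt, token_eq]
    cases h : pbToken token.toList false <;> simp [ih]
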